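-- pv_equiv track=rewrite | github.com/bgruening/galaxytools | tools/biopython/gffDB/GAG/src/gene_part.py | write_tbl_entry
-- ===== SOURCE A (Python) =====
-- def get_reversed_indices(indices):
--     """Returns reversed list of indices.
--
--     Each pair in the list is reversed, and the order of the
--     pairs is also reversed.
--     """
--     indices.reverse()
--     [ind.reverse() for ind in indices]
--     return indices
--
-- def one_line_indices_entry(indices, has_start, has_stop, feature_type):
--     """Returns .tbl formatted entry for features with only one pair of coordinates."""
--     output = ""
--     if not has_start:
--         output += "<"
--     output += str(indices[0]) + "\t"
--     if not has_stop:
--         output += ">"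
--     output += str(indices[1]) + "\t"
--     output += feature_type+"\n"
--     return output
--
-- def write_tbl_entry(indices, strand, has_start, has_stop, feature_type, phase=0):
--     """Returns .tbl-formatted string for a GenePart.
--
--     Args:
--         indices: a list of lists, each holding an index pair
--         strand: either '+' or '-'
--         has_start: a boolean indicating whether the feature has a start codon
--         has_stop: a boolean indicating whether the feature has a stop codon
--         feature_type: tbl feature type (i.e. CDS, mRNA, tRNA, etc)
--         phase: optional argument indicating the phase of a CDS feature if not 0
--     """
--     output = ""
--     if strand == "-":
--         indices = get_reversed_indices(indices)
--     if len(indices) == 1: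
--         output += one_line_indices_entry(indices[0], has_start, has_stop, feature_type)
--     else:
--         # Write first line of coordinates
--         if not has_start:
--             output += "<"
--         output += str(indices[0][0]) + "\t" + str(indices[0][1]) + "\t"
--         output += feature_type+"\n"
--         # Write middle lines
--         for index_pair in indices[1:-1]:
--             output += str(index_pair[0]) + "\t" + str(index_pair[1]) + "\n"
--         # Write last line of coordinates
--         output += str(indices[-1][0]) + "\t"
--         if not has_stop:
--             output += ">"
--         output += str(indices[-1][1]) + "\n"
--     if feature_type == "CDS":
--         output += "\t\t\tcodon_start\t" + str(phase+1) + "\n"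
--     return output
-- ===== SOURCE B (Python) =====
-- def write_tbl_entry(indices, strand, has_start, has_stop, feature_type, phase=0):
--     if strand == "-":
--         indices.reverse()
--         for pair in indices:
--             pair.reverse()
--     # Stage 1: build a bare coordinate table, with no markers anywhere.
--     cells = [[str(pair[0]), str(pair[1])] for pair in indices]
--     # Stage 2: patch the table's edges in place.
--     if not has_start:
--         cells[0][0] = "<" + cells[0][0]
--     if not has_stop:
--         cells[-1][1] = ">" + cells[-1][1]
--     cells[0] = cells[0] + [feature_type]
--     # Stage 3: render the table row by row.
--     output = ""
--     for row in cells: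
--         output += "\t".join(row) + "\n"
--     if feature_type == "CDS":
--         output += "\t\t\tcodon_start\t" + str(phase + 1) + "\n"
--     return output
-- ===== Notes on version B (the rewrite author's own statement) =====
-- stated objective: alternative
-- what changed: A streams one string through three positional code paths (one_line helper, first line, middle loop, last line); B instead builds a bare list-of-rows coordinate table in one comprehension, then patches the '<'/'>' markers and the feature_type column into the table's edge cells by index assignment, and finally renders the table row by row with '\t'.join.
import Mathlib
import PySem

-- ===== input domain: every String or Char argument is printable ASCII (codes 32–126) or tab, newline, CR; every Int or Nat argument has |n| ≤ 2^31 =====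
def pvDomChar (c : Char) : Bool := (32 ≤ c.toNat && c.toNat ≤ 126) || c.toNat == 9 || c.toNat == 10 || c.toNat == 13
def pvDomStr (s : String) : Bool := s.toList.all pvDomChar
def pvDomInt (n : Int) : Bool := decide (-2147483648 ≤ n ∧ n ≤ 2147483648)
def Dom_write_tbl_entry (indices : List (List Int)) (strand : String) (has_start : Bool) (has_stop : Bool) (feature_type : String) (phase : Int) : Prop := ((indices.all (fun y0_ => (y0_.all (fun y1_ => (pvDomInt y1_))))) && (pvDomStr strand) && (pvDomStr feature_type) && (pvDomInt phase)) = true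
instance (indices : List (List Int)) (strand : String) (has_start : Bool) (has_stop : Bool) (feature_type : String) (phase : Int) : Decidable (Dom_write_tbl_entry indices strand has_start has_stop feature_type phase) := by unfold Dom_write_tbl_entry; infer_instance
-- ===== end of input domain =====

-- B replaces A's streamed three-code-path string building by a three-stage table pipeline:
-- build a bare row table, patch the markers/type column into its edge cells by index
-- assignment, then render it (alternative decomposition, same cost). Both Pythons mutate
-- `indices` in place identically on strand == '-'; the theorems are about the return value.

-- ===== PORT A =====
def pv_get_reversed_indices (indices : List (List Int)) : List (List Int) :=
  (indices.reverse).map (fun ind => ind.reverse)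

def pv_one_line_indices_entry (indices : List Int) (has_start : Bool) (has_stop : Bool) (feature_type : String) : String :=
  let output : String := ""
  let output := if !has_start then output ++ "<" else output
  let output := output ++ PySem.Int.toStr (PySem.List.pyGetD indices 0 0) ++ "\t"
  let output := if !has_stop then output ++ ">" else output
  output ++ PySem.Int.toStr (PySem.List.pyGetD indices 1 0) ++ "\t" ++ feature_type ++ "\n"

def write_tbl_entry (indices : List (List Int)) (strand : String) (has_start : Bool) (has_stop : Bool) (feature_type : String) (phase : Int) : String :=
  let indices := if strand == "-" then pv_get_reversed_indices indices else indices
  let output : String := ""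
  let output :=
    if indices.length == 1 then
      output ++ pv_one_line_indices_entry (PySem.List.pyGetD indices 0 []) has_start has_stop feature_type
    else
      -- Write first line of coordinates
      let output := if !has_start then output ++ "<" else output
      let output := output ++ PySem.Int.toStr (PySem.List.pyGetD (PySem.List.pyGetD indices 0 []) 0 0) ++ "\t"
                           ++ PySem.Int.toStr (PySem.List.pyGetD (PySem.List.pyGetD indices 0 []) 1 0) ++ "\t"
      let output := output ++ feature_type ++ "\n"
      -- Write middle lines
      let output := (PySem.List.slice indices (some 1) (some (-1))).foldl
        (fun acc index_pair =>
          acc ++ PySem.Int.toStr (PySem.List.pyGetD index_pair 0 0) ++ "\t"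
              ++ PySem.Int.toStr (PySem.List.pyGetD index_pair 1 0) ++ "\n") output
      -- Write last line of coordinates
      let output := output ++ PySem.Int.toStr (PySem.List.pyGetD (PySem.List.pyGetD indices (-1) []) 0 0) ++ "\t"
      let output := if !has_stop then output ++ ">" else output
      output ++ PySem.Int.toStr (PySem.List.pyGetD (PySem.List.pyGetD indices (-1) []) 1 0) ++ "\n"
  if feature_type == "CDS" then
    output ++ "\t\t\tcodon_start\t" ++ PySem.Int.toStr (phase + 1) ++ "\n"
  else output

-- ===== PORT B =====
def write_tbl_entry_alt (indices : List (List Int)) (strand : String) (has_start : Bool) (has_stop : Bool) (feature_type : String) (phase : Int) : String :=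
  let indices := if strand == "-" then (indices.reverse).map (fun pair => pair.reverse) else indices
  -- Stage 1: build a bare coordinate table, with no markers anywhere.
  let cells : List (List String) := indices.map (fun pair =>
    [PySem.Int.toStr (PySem.List.pyGetD pair 0 0), PySem.Int.toStr (PySem.List.pyGetD pair 1 0)])
  -- Stage 2: patch the table's edges in place (cells[0][0], cells[-1][1], cells[0].append).
  let cells := if !has_start then
      PySem.List.pySetD cells 0 (PySem.List.pySetD (PySem.List.pyGetD cells 0 []) 0
        ("<" ++ PySem.List.pyGetD (PySem.List.pyGetD cells 0 []) 0 ""))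
    else cells
  let cells := if !has_stop then
      PySem.List.pySetD cells (-1) (PySem.List.pySetD (PySem.List.pyGetD cells (-1) []) 1
        (">" ++ PySem.List.pyGetD (PySem.List.pyGetD cells (-1) []) 1 ""))
    else cells
  let cells := PySem.List.pySetD cells 0 (PySem.List.pyGetD cells 0 [] ++ [feature_type])
  -- Stage 3: render the table row by row.
  let output := cells.foldl (fun acc row => acc ++ PySem.Str.join "\t" row ++ "\n") ""
  if feature_type == "CDS" then
    output ++ "\t\t\tcodon_start\t" ++ PySem.Int.toStr (phase + 1) ++ "\n"
  else output

-- ===== PRECONDITION & SPEC =====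
-- Pre_ excludes exactly the inputs where Python A raises IndexError: an empty indices list, or
-- an index pair with fewer than two coordinates.
def Pre_write_tbl_entry (indices : List (List Int)) (strand : String) (has_start : Bool) (has_stop : Bool) (feature_type : String) (phase : Int) : Prop :=
  indices ≠ [] ∧ ∀ p ∈ indices, 2 ≤ p.length
instance (indices : List (List Int)) (strand : String) (has_start : Bool) (has_stop : Bool) (feature_type : String) (phase : Int) : Decidable (Pre_write_tbl_entry indices strand has_start has_stop feature_type phase) := by unfold Pre_write_tbl_entry; infer_instance

def pvWitness_write_tbl_entry : List (List Int) × String × Bool × Bool × String × Int :=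
  ([[1, 50], [60, 90]], "-", true, false, "CDS", 0)

def Spec_write_tbl_entry (indices : List (List Int)) (strand : String) (has_start : Bool) (has_stop : Bool) (feature_type : String) (phase : Int) (out : String) : Prop := out = write_tbl_entry_alt indices strand has_start has_stop feature_type phase
instance (indices : List (List Int)) (strand : String) (has_start : Bool) (has_stop : Bool) (feature_type : String) (phase : Int) (out : String) : Decidable (Spec_write_tbl_entry indices strand has_start has_stop feature_type phase out) := by unfold Spec_write_tbl_entry; infer_instance

-- ===== CLAIM (what is proved, stated in full; the proofs are below) =====
def Claim_equal_write_tbl_entry : Prop := ∀ (indices : List (List Int)) (strand : String) (has_start : Bool) (has_stop : Bool) (feature_type : String) (phase : Int), Dom_write_tbl_entry indices strand has_start has_stop feature_type phase → Pre_write_tbl_entry indices strand has_start has_stop feature_type phase → Spec_write_tbl_entry indices strand has_start has_stop feature_type phase (write_tbl_entry indices strand has_start has_stop feature_type phase)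

-- ===== LEMMAS AND PROOFS =====

-- B's bare table row for one index pair.
def pvRow (pair : List Int) : List String :=
  [PySem.Int.toStr (PySem.List.pyGetD pair 0 0), PySem.Int.toStr (PySem.List.pyGetD pair 1 0)]

lemma pv_slice_one_neg_one (p : List Int) (ys : List (List Int)) :
    PySem.List.slice (p :: ys) (some 1) (some (-1)) = ys.dropLast := by
  have h : ¬((ys.length : Int) < 0) := by omega
  simp [PySem.List.slice, PySem.List.clampIdx, List.dropLast_eq_take, h]

lemma pv_pyGetD_zero_cons {α : Type} (x : α) (ys : List α) (d : α) :
    PySem.List.pyGetD (x :: ys) 0 d = x := by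
  simp [PySem.List.pyGetD, PySem.List.pyGet?, PySem.List.pyIdx?]

lemma pv_pySetD_zero_cons {α : Type} (x : α) (ys : List α) (v : α) :
    PySem.List.pySetD (x :: ys) 0 v = v :: ys := by
  simp [PySem.List.pySetD, PySem.List.pySet?, PySem.List.pyIdx?]

lemma pv_pyGetD_neg_one_cons {α : Type} (x : α) (ys : List α) (d : α) (h : ys ≠ []) :
    PySem.List.pyGetD (x :: ys) (-1) d = PySem.List.pyGetD ys (-1) d := by
  rw [PySem.List.pyGetD_neg_one (x :: ys) d (by simp), PySem.List.pyGetD_neg_one ys d h,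
      List.getLast_cons h]

lemma pv_pySetD_neg_one_cons {α : Type} (x : α) (ys : List α) (v : α) (h : ys ≠ []) :
    PySem.List.pySetD (x :: ys) (-1) v = x :: PySem.List.pySetD ys (-1) v := by
  cases ys with
  | nil => exact absurd rfl h
  | cons y r => simp [PySem.List.pySetD, PySem.List.pySet?, PySem.List.pyIdx?]

lemma pv_join_pair (a b : String) : PySem.Str.join "\t" [a, b] = a ++ "\t" ++ b := by
  rw [← String.toList_inj]
  simp [PySem.Str.toList_join, PySem.Chars.join_cons_cons, PySem.Chars.join_singleton]

-- Rendering B's first table row equals A's first output line.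
lemma pv_headA (p : List Int) (ft : String) :
    ("" : String) ++ PySem.Str.join "\t" (pvRow p ++ [ft]) ++ "\n"
    = "" ++ PySem.Int.toStr (PySem.List.pyGetD p 0 0) ++ "\t"
         ++ PySem.Int.toStr (PySem.List.pyGetD p 1 0) ++ "\t" ++ ft ++ "\n" := by
  rw [← String.toList_inj]
  simp [pvRow, PySem.Str.toList_join, PySem.Chars.join_cons_cons, PySem.Chars.join_singleton]

lemma pv_headB (p : List Int) (ft : String) :
    ("" : String) ++ PySem.Str.join "\t"
        (PySem.List.pySetD (pvRow p) 0 ("<" ++ PySem.List.pyGetD (pvRow p) 0 "") ++ [ft]) ++ "\n"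
    = "" ++ "<" ++ PySem.Int.toStr (PySem.List.pyGetD p 0 0) ++ "\t"
         ++ PySem.Int.toStr (PySem.List.pyGetD p 1 0) ++ "\t" ++ ft ++ "\n" := by
  rw [← String.toList_inj]
  simp [pvRow, PySem.List.pySetD, PySem.List.pySet?, PySem.List.pyIdx?,
        PySem.List.pyGetD, PySem.List.pyGet?,
        PySem.Str.toList_join, PySem.Chars.join_cons_cons, PySem.Chars.join_singleton]

-- B's stage-2 stop patch + stage-3 render of the rows after the first one equals A's middle
-- fold followed by A's last line.
lemma pv_tail (has_stop : Bool) :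
    ∀ (L : List (List Int)), L ≠ [] → ∀ (acc : String),
      (if !has_stop then
          PySem.List.pySetD (L.map pvRow) (-1)
            (PySem.List.pySetD (PySem.List.pyGetD (L.map pvRow) (-1) []) 1
              (">" ++ PySem.List.pyGetD (PySem.List.pyGetD (L.map pvRow) (-1) []) 1 ""))
        else L.map pvRow).foldl (fun acc row => acc ++ PySem.Str.join "\t" row ++ "\n") acc
      =
      (if !has_stop then
          L.dropLast.foldl
            (fun a p => a ++ PySem.Int.toStr (PySem.List.pyGetD p 0 0) ++ "\t"
                          ++ PySem.Int.toStr (PySem.List.pyGetD p 1 0) ++ "\n") acc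
            ++ PySem.Int.toStr (PySem.List.pyGetD (PySem.List.pyGetD L (-1) []) 0 0) ++ "\t" ++ ">"
        else
          L.dropLast.foldl
            (fun a p => a ++ PySem.Int.toStr (PySem.List.pyGetD p 0 0) ++ "\t"
                          ++ PySem.Int.toStr (PySem.List.pyGetD p 1 0) ++ "\n") acc
            ++ PySem.Int.toStr (PySem.List.pyGetD (PySem.List.pyGetD L (-1) []) 0 0) ++ "\t")
        ++ PySem.Int.toStr (PySem.List.pyGetD (PySem.List.pyGetD L (-1) []) 1 0) ++ "\n" := by
  intro L
  induction L with
  | nil => intro h; exact absurd rfl h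
  | cons x ys ih =>
      intro _ acc
      cases ys with
      | nil =>
          rw [show PySem.List.pyGetD [x] (-1) ([] : List Int) = x from
                PySem.List.pyGetD_neg_one [x] [] (by simp)]
          cases has_stop <;>
            (rw [← String.toList_inj]
             simp [pvRow, PySem.List.pySetD, PySem.List.pySet?, PySem.List.pyIdx?,
                   PySem.List.pyGetD, PySem.List.pyGet?,
                   PySem.Str.toList_join, PySem.Chars.join_cons_cons,
                   PySem.Chars.join_singleton])
      | cons y r =>
          have hm : ((y :: r).map pvRow) ≠ [] := by simp
          rw [List.map_cons, pv_pyGetD_neg_one_cons _ _ _ hm, pv_pySetD_neg_one_cons _ _ _ hm,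
              pv_pyGetD_neg_one_cons x (y :: r) ([] : List Int) (by simp)]
          have hrow : ∀ (a : String),
              a ++ PySem.Str.join "\t" (pvRow x) ++ "\n"
              = a ++ PySem.Int.toStr (PySem.List.pyGetD x 0 0) ++ "\t"
                  ++ PySem.Int.toStr (PySem.List.pyGetD x 1 0) ++ "\n" := by
            intro a; rw [pvRow, pv_join_pair]; simp [String.append_assoc]
          have step := ih (by simp) (acc ++ PySem.Int.toStr (PySem.List.pyGetD x 0 0) ++ "\t"
                  ++ PySem.Int.toStr (PySem.List.pyGetD x 1 0) ++ "\n")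
          cases has_stop <;>
            simp only [Bool.not_true, Bool.not_false, Bool.false_eq_true,
                       if_true, if_false, List.foldl_cons,
                       List.dropLast_cons_of_ne_nil (by simp : (y :: r) ≠ ([] : List (List Int))),
                       hrow] at step ⊢ <;>
            exact step

-- The whole pre-codon_start body: A's branching string build equals B's table pipeline.
lemma pv_main (J : List (List Int)) (has_start has_stop : Bool) (ft : String) (hne : J ≠ []) :
    (if J.length == 1 then
      ("" : String) ++ pv_one_line_indices_entry (PySem.List.pyGetD J 0 []) has_start has_stop ft
    else
      let output := if !has_start then ("" : String) ++ "<" else ""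
      let output := output ++ PySem.Int.toStr (PySem.List.pyGetD (PySem.List.pyGetD J 0 []) 0 0) ++ "\t"
                           ++ PySem.Int.toStr (PySem.List.pyGetD (PySem.List.pyGetD J 0 []) 1 0) ++ "\t"
      let output := output ++ ft ++ "\n"
      let output := (PySem.List.slice J (some 1) (some (-1))).foldl
        (fun acc index_pair =>
          acc ++ PySem.Int.toStr (PySem.List.pyGetD index_pair 0 0) ++ "\t"
              ++ PySem.Int.toStr (PySem.List.pyGetD index_pair 1 0) ++ "\n") output
      let output := output ++ PySem.Int.toStr (PySem.List.pyGetD (PySem.List.pyGetD J (-1) []) 0 0) ++ "\t"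
      let output := if !has_stop then output ++ ">" else output
      output ++ PySem.Int.toStr (PySem.List.pyGetD (PySem.List.pyGetD J (-1) []) 1 0) ++ "\n")
    =
    (let cells : List (List String) := J.map (fun pair =>
        [PySem.Int.toStr (PySem.List.pyGetD pair 0 0), PySem.Int.toStr (PySem.List.pyGetD pair 1 0)])
     let cells := if !has_start then
        PySem.List.pySetD cells 0 (PySem.List.pySetD (PySem.List.pyGetD cells 0 []) 0
          ("<" ++ PySem.List.pyGetD (PySem.List.pyGetD cells 0 []) 0 ""))
      else cells
     let cells := if !has_stop then
        PySem.List.pySetD cells (-1) (PySem.List.pySetD (PySem.List.pyGetD cells (-1) []) 1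
          (">" ++ PySem.List.pyGetD (PySem.List.pyGetD cells (-1) []) 1 ""))
      else cells
     let cells := PySem.List.pySetD cells 0 (PySem.List.pyGetD cells 0 [] ++ [ft])
     cells.foldl (fun acc row => acc ++ PySem.Str.join "\t" row ++ "\n") "") := by
  cases J with
  | nil => exact absurd rfl hne
  | cons p tail =>
    cases tail with
    | nil =>
        rw [← String.toList_inj]
        cases has_start <;> cases has_stop <;>
          simp [pv_one_line_indices_entry, PySem.List.pySetD, PySem.List.pySet?,
                PySem.List.pyIdx?, PySem.List.pyGetD, PySem.List.pyGet?,
                PySem.Str.toList_join, PySem.Chars.join_cons_cons, PySem.Chars.join_singleton]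
    | cons q rest =>
        have hlen : ((p :: q :: rest).length == 1) = false := by simp
        have hm : ((q :: rest).map pvRow) ≠ [] := by simp
        rw [hlen]
        simp only [Bool.false_eq_true, if_false]
        rw [pv_slice_one_neg_one,
            pv_pyGetD_neg_one_cons p (q :: rest) ([] : List Int) (by simp)]
        conv_rhs =>
          rw [show (p :: q :: rest).map (fun pair =>
                [PySem.Int.toStr (PySem.List.pyGetD pair 0 0),
                 PySem.Int.toStr (PySem.List.pyGetD pair 1 0)])
              = pvRow p :: (q :: rest).map pvRow by simp [pvRow]]
        have htail := pv_tail has_stop (q :: rest) (by simp)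
        cases has_start <;> cases has_stop <;>
          · simp only [Bool.not_true, Bool.not_false, Bool.false_eq_true,
                       if_true, if_false,
                       pv_pyGetD_zero_cons, pv_pySetD_zero_cons,
                       pv_pyGetD_neg_one_cons _ _ _ hm, pv_pySetD_neg_one_cons _ _ _ hm,
                       List.foldl_cons] at htail ⊢
            first
            | rw [pv_headB p ft]
            | rw [pv_headA p ft]
            exact (htail _).symm

-- ===== VERDICT (by name: the statement is the Claim_ definition above) =====
theorem write_tbl_entry_spec : Claim_equal_write_tbl_entry := by
  intro indices strand has_start has_stop feature_type phase _ hpre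
  unfold Spec_write_tbl_entry write_tbl_entry write_tbl_entry_alt
  simp only [pv_get_reversed_indices]
  cases hstrand : (strand == "-") <;> simp only [if_true, if_false, Bool.false_eq_true]
  · have h := pv_main indices has_start has_stop feature_type hpre.1
    cases hft : (feature_type == "CDS") <;> simp only [if_true, if_false, Bool.false_eq_true]
    · exact h
    · exact congrArg (fun s => s ++ "\t\t\tcodon_start\t" ++ PySem.Int.toStr (phase + 1) ++ "\n") h
  · have hne : (indices.reverse.map (fun ind => ind.reverse)) ≠ [] := by
      simp [hpre.1]
    have h := pv_main (indices.reverse.map (fun ind => ind.reverse)) has_start has_stop feature_type hne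
    cases hft : (feature_type == "CDS") <;> simp only [if_true, if_false, Bool.false_eq_true]
    · exact h
    · exact congrArg (fun s => s ++ "\t\t\tcodon_start\t" ++ PySem.Int.toStr (phase + 1) ++ "\n") h
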